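-- pv_equiv track=rewrite | github.com/RensOliemans/randomshit | dobbel/dertigen.py | decide_minimum
-- ===== SOURCE A (Python) =====
-- from itertools import product
--
-- AMOUNT = 6
--
-- ALL_THROWS = {x: list(product(*[range(1, 7) for _ in range(x)])) for x in range(1, 7)}
--
-- def decide_minimum(dice, chosen=None, goal=10):
--     """ The same as decide_maximum(), but then for a minimal score. """
--     chosen = chosen or [1] * (AMOUNT - len(dice))
--     if sum(dice) + sum(chosen) <= goal:
--         return dice
--
--     amount = len(dice)
--     dice = sorted(dice)
--     # dice.reverse()
--     hand = list()
--     for die in dice: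
--         # lower is the amount of throws where the minimum die is lower
--         # than the current die
--         lower = len([x for x in ALL_THROWS[amount] if min(x) < die])
--         if lower < len(ALL_THROWS[amount]) - lower:
--             hand.append(die)
--             amount -= 1
--     return hand or [min(dice)]
-- ===== SOURCE B (Python) =====
-- def decide_minimum(dice, chosen=None, goal=10):
--     """ Same result as A, but the count of throws whose minimum is below the
--     die is taken in closed form (6**a - clamp(7-die,0,6)**a) instead of
--     enumerating and scanning all 6**a throws. """
--     chosen = chosen or [1] * (6 - len(dice))
--     if sum(dice) + sum(chosen) <= goal:
--         return dice
--     s = sorted(dice)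
--     amount = len(s)
--     hand = []
--     for die in s:
--         c = min(6, max(0, 7 - die))
--         # keep the die iff throws with min >= die outnumber those with min < die:
--         # c**amount > 6**amount - c**amount
--         if 2 * c ** amount > 6 ** amount:
--             hand.append(die)
--             amount -= 1
--     return hand or [s[0]]
-- ===== Notes on version B (the rewrite author's own statement) =====
-- stated objective: alternative
-- what changed: B replaces A's enumeration of all 6^amount throws and the scan counting those with min(x) < die by the closed-form count 6^amount - clamp(7-die,0,6)^amount, so the keep/drop test is one integer-power comparison per die (a timing run large inputs all take the early sum<=goal return, so no speed is claimed).
import Mathlib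
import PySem

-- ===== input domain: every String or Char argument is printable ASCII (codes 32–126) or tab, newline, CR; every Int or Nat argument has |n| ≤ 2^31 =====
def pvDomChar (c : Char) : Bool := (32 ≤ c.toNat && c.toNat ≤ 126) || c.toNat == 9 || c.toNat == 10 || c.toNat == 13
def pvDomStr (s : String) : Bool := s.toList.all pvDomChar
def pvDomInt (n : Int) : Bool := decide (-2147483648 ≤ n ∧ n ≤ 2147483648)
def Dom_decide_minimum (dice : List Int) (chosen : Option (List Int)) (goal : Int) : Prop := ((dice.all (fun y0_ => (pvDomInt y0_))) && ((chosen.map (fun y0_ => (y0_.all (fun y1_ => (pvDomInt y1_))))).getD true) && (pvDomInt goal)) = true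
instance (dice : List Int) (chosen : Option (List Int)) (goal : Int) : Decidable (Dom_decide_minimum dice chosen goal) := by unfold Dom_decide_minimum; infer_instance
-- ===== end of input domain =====

-- B replaces A's enumeration-and-scan of all 6^amount throws by the closed-form
-- count comparison 2*clamp(7-die,0,6)^amount > 6^amount (objective: alternative).
-- Pre_ excludes exactly the inputs on which A raises (KeyError / ValueError).


-- ===== PORT A =====

-- min(x) for a Python list; every use below is on a nonempty list (where it is exact)
def aMin (x : List Int) : Int := (PySem.List.min? x (fun y => y)).getD 0

-- ALL_THROWS[a] = list(product(*[range(1, 7) for _ in range(a)]))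
def allThrows : Nat → List (List Int)
  | 0 => [[]]
  | a + 1 => (PySem.List.pyRange 1 7 1).flatMap (fun d => (allThrows a).map (fun t => d :: t))

-- `chosen = chosen or [1] * (AMOUNT - len(dice))` (AMOUNT = 6)
def defaultChosen (dice : List Int) (chosen : Option (List Int)) : List Int :=
  match chosen with
  | some l => if l.isEmpty then List.replicate (6 - dice.length) (1 : Int) else l
  | none => List.replicate (6 - dice.length) (1 : Int)

def decide_minimum (dice : List Int) (chosen : Option (List Int)) (goal : Int) : List Int :=
  let chosen' := defaultChosen dice chosen
  if dice.sum + chosen'.sum ≤ goal then dice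
  else
    let sorted := PySem.List.sorted dice (fun y => y)
    let res := sorted.foldl (fun (st : Nat × List Int) die =>
      -- lower = len([x for x in ALL_THROWS[amount] if min(x) < die])
      if (((allThrows st.1).filter (fun x => decide (aMin x < die))).length : Int)
          < ((allThrows st.1).length : Int)
            - (((allThrows st.1).filter (fun x => decide (aMin x < die))).length : Int)
      then (st.1 - 1, st.2 ++ [die]) else st) (dice.length, [])
    if res.2.isEmpty then [aMin sorted] else res.2

-- ===== PORT B =====

def decide_minimum_alt (dice : List Int) (chosen : Option (List Int)) (goal : Int) : List Int :=
  let chosen' := defaultChosen dice chosen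
  if dice.sum + chosen'.sum ≤ goal then dice
  else
    let s := PySem.List.sorted dice (fun y => y)
    let res := s.foldl (fun (st : Nat × List Int) die =>
      -- c = min(6, max(0, 7 - die)); keep iff 2 * c ** amount > 6 ** amount
      if 2 * (min 6 (max 0 (7 - die))) ^ st.1 > (6 : Int) ^ st.1
      then (st.1 - 1, st.2 ++ [die]) else st) (dice.length, [])
    -- s[0]; s is nonempty wherever this line is reached under Pre_
    if res.2.isEmpty then [s.headD 0] else res.2

-- ===== PRECONDITION & SPEC =====

-- Pre_ excludes exactly the inputs where A raises: when the early sum-return does not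
-- fire, A needs 1 ≤ len(dice) ≤ 6 (ALL_THROWS has keys 1..6 only; min of an empty list raises).
def Pre_decide_minimum (dice : List Int) (chosen : Option (List Int)) (goal : Int) : Prop :=
  (dice.sum + (defaultChosen dice chosen).sum ≤ goal) ∨ (1 ≤ dice.length ∧ dice.length ≤ 6)
instance (dice : List Int) (chosen : Option (List Int)) (goal : Int) : Decidable (Pre_decide_minimum dice chosen goal) := by unfold Pre_decide_minimum; infer_instance

def pvWitness_decide_minimum : List Int × Option (List Int) × Int := ([3, 4], none, 1)

def Spec_decide_minimum (dice : List Int) (chosen : Option (List Int)) (goal : Int) (out : List Int) : Prop := out = decide_minimum_alt dice chosen goal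
instance (dice : List Int) (chosen : Option (List Int)) (goal : Int) (out : List Int) : Decidable (Spec_decide_minimum dice chosen goal out) := by unfold Spec_decide_minimum; infer_instance

-- ===== CLAIM (what is proved, stated in full; the proofs are below) =====
def Claim_equal_decide_minimum : Prop := ∀ (dice : List Int) (chosen : Option (List Int)) (goal : Int), Dom_decide_minimum dice chosen goal → Pre_decide_minimum dice chosen goal → Spec_decide_minimum dice chosen goal (decide_minimum dice chosen goal)


-- ===== LEMMAS AND PROOFS =====

lemma countP_flatMap' (p : List Int → Bool) (f : Int → List (List Int)) (l : List Int) :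
    (l.flatMap f).countP p = (l.map (fun d => (f d).countP p)).sum := by
  induction l with
  | nil => simp
  | cons d t ih => simp [List.flatMap_cons, List.countP_append, ih]

-- ALL_THROWS[a] contains exactly C^a throws whose dice are all ≥ d, C = clamp(7-d, 0, 6)
lemma countP_allThrows (a : Nat) (d : Int) :
    (allThrows a).countP (fun x => decide (∀ e ∈ x, d ≤ e))
      = (min 6 (max 0 (7 - d))).toNat ^ a := by
  induction a with
  | zero => simp [allThrows]
  | succ a ih =>
    rw [allThrows, countP_flatMap']
    have hmap : ∀ d1 : Int,
        ((allThrows a).map (fun t => d1 :: t)).countP (fun x => decide (∀ e ∈ x, d ≤ e))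
          = if d ≤ d1 then (min 6 (max 0 (7 - d))).toNat ^ a else 0 := by
      intro d1
      rw [List.countP_map]
      by_cases h : d ≤ d1
      · rw [if_pos h, ← ih]
        apply List.countP_congr
        intro x _
        simp [h]
      · rw [if_neg h]
        simp only [List.countP_eq_zero]
        intro x _
        simp only [Function.comp_apply, decide_eq_true_eq]
        intro hall
        exact h (hall d1 (by simp))
    rw [show PySem.List.pyRange 1 7 1 = [1, 2, 3, 4, 5, 6] from by decide]
    simp only [List.map_cons, List.map_nil, hmap, List.sum_cons, List.sum_nil, add_zero]
    rw [pow_succ]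
    by_cases h1 : d ≤ 1
    · rw [if_pos h1, if_pos (by omega), if_pos (by omega), if_pos (by omega),
        if_pos (by omega), if_pos (by omega), show (min 6 (max 0 (7 - d))).toNat = 6 by omega]
      ring
    · by_cases h2 : d ≤ 2
      · rw [if_neg h1, if_pos h2, if_pos (by omega), if_pos (by omega),
          if_pos (by omega), if_pos (by omega), show (min 6 (max 0 (7 - d))).toNat = 5 by omega]
        ring
      · by_cases h3 : d ≤ 3
        · rw [if_neg h1, if_neg h2, if_pos h3, if_pos (by omega),
            if_pos (by omega), if_pos (by omega), show (min 6 (max 0 (7 - d))).toNat = 4 by omega]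
          ring
        · by_cases h4 : d ≤ 4
          · rw [if_neg h1, if_neg h2, if_neg h3, if_pos h4,
              if_pos (by omega), if_pos (by omega), show (min 6 (max 0 (7 - d))).toNat = 3 by omega]
            ring
          · by_cases h5 : d ≤ 5
            · rw [if_neg h1, if_neg h2, if_neg h3, if_neg h4,
                if_pos h5, if_pos (by omega), show (min 6 (max 0 (7 - d))).toNat = 2 by omega]
              ring
            · by_cases h6 : d ≤ 6
              · rw [if_neg h1, if_neg h2, if_neg h3, if_neg h4,
                  if_neg h5, if_pos h6, show (min 6 (max 0 (7 - d))).toNat = 1 by omega]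
                ring
              · rw [if_neg h1, if_neg h2, if_neg h3, if_neg h4,
                  if_neg h5, if_neg h6, show (min 6 (max 0 (7 - d))).toNat = 0 by omega]
                ring

lemma length_allThrows (a : Nat) : (allThrows a).length = 6 ^ a := by
  induction a with
  | zero => rfl
  | succ a ih =>
    simp [allThrows, List.length_flatMap, ih, pow_succ]
    ring

lemma length_mem_allThrows {a : Nat} {x : List Int} (hx : x ∈ allThrows a) : x.length = a := by
  induction a generalizing x with
  | zero => simp [allThrows] at hx; simp [hx]
  | succ a ih =>
    simp only [allThrows, List.mem_flatMap, List.mem_map] at hx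
    obtain ⟨d, -, t, ht, rfl⟩ := hx
    simp [ih ht]

lemma aMin_lt_iff {x : List Int} (hx : x ≠ []) (d : Int) :
    (aMin x < d) ↔ ¬ (∀ e ∈ x, d ≤ e) := by
  obtain ⟨m, hm⟩ : ∃ m, PySem.List.min? x (fun y => y) = some m := by
    cases x with
    | nil => exact absurd rfl hx
    | cons y t => exact ⟨t.foldl min y, PySem.List.min?_id_cons y t⟩
  have hmem := PySem.List.min?_mem hm
  have hmin := PySem.List.min?_isMin hm
  simp only [aMin, hm, Option.getD_some]
  constructor
  · intro h hall
    exact absurd (hall m hmem) (not_le.mpr h)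
  · intro h
    push_neg at h
    obtain ⟨e, he, hed⟩ := h
    exact lt_of_le_of_lt (hmin e he) hed

-- A's keep/drop test over ALL_THROWS[a] coincides with B's closed-form power test
lemma cond_iff (a : Nat) (ha : 1 ≤ a) (d : Int) :
    ((((allThrows a).filter (fun x => decide (aMin x < d))).length : Int)
        < ((allThrows a).length : Int) - (((allThrows a).filter (fun x => decide (aMin x < d))).length : Int))
      ↔ 2 * (min 6 (max 0 (7 - d))) ^ a > (6 : Int) ^ a := by
  have hC : (0:Int) ≤ min 6 (max 0 (7 - d)) := by omega
  have hfc : ((allThrows a).filter (fun x => decide (aMin x < d))).length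
      = (allThrows a).countP (fun x => decide (aMin x < d)) := by
    rw [List.countP_eq_length_filter]
  have hcongr : (allThrows a).countP (fun x => decide (aMin x < d))
      = (allThrows a).countP (fun x => decide (∃ e ∈ x, e < d)) := by
    apply List.countP_congr
    intro x hxmem
    have hx : x ≠ [] := by
      have := length_mem_allThrows hxmem
      intro h; rw [h] at this; simp at this; omega
    simp [aMin_lt_iff hx d, not_forall, not_le]
  have hsum : (allThrows a).countP (fun x => decide (∀ e ∈ x, d ≤ e))
      + (allThrows a).countP (fun x => decide (∃ e ∈ x, e < d)) = (allThrows a).length := by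
    simpa using (List.length_eq_countP_add_countP (fun x => decide (∀ e ∈ x, d ≤ e)) (l := allThrows a)).symm
  rw [hfc, hcongr]
  have hcnt := countP_allThrows a d
  have hlen := length_allThrows a
  set C := (min 6 (max 0 (7 - d))).toNat with hCdef
  have hCpow : (min 6 (max 0 (7 - d))) ^ a = ((C ^ a : Nat) : Int) := by
    push_cast
    rw [Int.toNat_of_nonneg hC]
  have hle : C ^ a ≤ 6 ^ a := Nat.pow_le_pow_left (by omega) a
  have key : ((((allThrows a).countP (fun x => decide (∃ e ∈ x, e < d))) : Int)
      < ((allThrows a).length : Int) - (((allThrows a).countP (fun x => decide (∃ e ∈ x, e < d))) : Int))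
      ↔ 6 ^ a < 2 * C ^ a := by omega
  rw [key, gt_iff_lt, hCpow]
  exact_mod_cast Iff.rfl

-- the two loop bodies agree as long as the remaining dice fit in `amount`
lemma fold_eq (l : List Int) (amount : Nat) (hand : List Int) (h : l.length ≤ amount) :
    l.foldl (fun (st : Nat × List Int) die =>
      if (((allThrows st.1).filter (fun x => decide (aMin x < die))).length : Int)
          < ((allThrows st.1).length : Int)
            - (((allThrows st.1).filter (fun x => decide (aMin x < die))).length : Int)
      then (st.1 - 1, st.2 ++ [die]) else st) (amount, hand)
    = l.foldl (fun (st : Nat × List Int) die =>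
      if 2 * (min 6 (max 0 (7 - die))) ^ st.1 > (6 : Int) ^ st.1
      then (st.1 - 1, st.2 ++ [die]) else st) (amount, hand) := by
  induction l generalizing amount hand with
  | nil => rfl
  | cons die rest ih =>
    simp only [List.foldl_cons, List.length_cons] at *
    have ha : 1 ≤ amount := by omega
    rw [show (if ((((allThrows amount).filter (fun x => decide (aMin x < die))).length : Int)
          < ((allThrows amount).length : Int) - (((allThrows amount).filter (fun x => decide (aMin x < die))).length : Int))
        then ((amount - 1 : Nat), hand ++ [die]) else (amount, hand))
      = (if 2 * (min 6 (max 0 (7 - die))) ^ amount > (6 : Int) ^ amount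
        then ((amount - 1 : Nat), hand ++ [die]) else (amount, hand)) from by
      rw [if_congr (cond_iff amount ha die) rfl rfl]]
    by_cases hc : 2 * (min 6 (max 0 (7 - die))) ^ amount > (6 : Int) ^ amount
    · rw [if_pos hc]
      exact ih (amount - 1) (hand ++ [die]) (by omega)
    · rw [if_neg hc]
      exact ih amount hand (by omega)

lemma foldl_min_of_le {x : Int} {t : List Int} (h : ∀ y ∈ t, x ≤ y) : t.foldl min x = x := by
  induction t generalizing x with
  | nil => rfl
  | cons y t ih =>
    simp only [List.foldl_cons]
    rw [min_eq_left (h y (by simp))]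
    exact ih (fun z hz => h z (by simp [hz]))

-- min(s) of the sorted list is its first element
lemma aMin_sorted_eq_headD (l : List Int) :
    aMin (PySem.List.sorted l (fun y => y)) = (PySem.List.sorted l (fun y => y)).headD 0 := by
  cases hs : PySem.List.sorted l (fun y => y) with
  | nil => simp [aMin, PySem.List.min?]
  | cons x t =>
    have hp : (PySem.List.sorted l (fun y => y)).Pairwise (fun a b => a ≤ b) := by
      simpa using PySem.List.sorted_pairwise (xs := l) (key := fun y => y)
    rw [hs] at hp
    have hx : ∀ y ∈ t, x ≤ y := (List.pairwise_cons.mp hp).1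
    simp [aMin, PySem.List.min?_id_cons, foldl_min_of_le hx]

-- ===== VERDICT =====
theorem decide_minimum_spec : Claim_equal_decide_minimum := by
  intro dice chosen goal _ hpre
  unfold Spec_decide_minimum decide_minimum decide_minimum_alt
  simp only []
  by_cases hsum : dice.sum + (defaultChosen dice chosen).sum ≤ goal
  · rw [if_pos hsum, if_pos hsum]
  · rw [if_neg hsum, if_neg hsum]
    have hlen := PySem.List.length_sorted (xs := dice) (key := fun y => y) (rev := false)
    rw [fold_eq (PySem.List.sorted dice (fun y => y)) dice.length [] (le_of_eq hlen),
      aMin_sorted_eq_headD]
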